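-- pv_equiv track=rewrite | github.com/AlgorithmHub/dash_building_blocks | dash_building_blocks/block.py | _camelify
-- ===== SOURCE A (Python) =====
-- def _camelify(name, delims=None):
--     delims = delims or ['-', '_']
--     chars = []
--     headsup = False
--     for c in name:
--         if headsup:
--             chars.append(c.upper())
--             headsup = False
--         elif c in delims:
--             headsup = True
--         else:
--             chars.append(c)
--     return ''.join(chars)
-- ===== SOURCE B (Python) =====
-- def _camelify(name, delims=None):
--     ds = frozenset(delims or ['-', '_'])
--     it = iter(name)
--     out = []
--     for c in it:
--         if c in ds:
--             out.append(next(it, '').upper())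
--         else:
--             out.append(c)
--     return ''.join(out)
-- ===== Notes on version B (the rewrite author's own statement) =====
-- stated objective: faster
-- what changed: Replaces the headsup boolean flag state machine testing membership in a delimiter list with a single iterator pass over a frozenset of delimiters that consumes the character after a delimiter directly via next(it, default), so the per-character O(d) list scan and the cross-iteration flag disappear.
import Mathlib
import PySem

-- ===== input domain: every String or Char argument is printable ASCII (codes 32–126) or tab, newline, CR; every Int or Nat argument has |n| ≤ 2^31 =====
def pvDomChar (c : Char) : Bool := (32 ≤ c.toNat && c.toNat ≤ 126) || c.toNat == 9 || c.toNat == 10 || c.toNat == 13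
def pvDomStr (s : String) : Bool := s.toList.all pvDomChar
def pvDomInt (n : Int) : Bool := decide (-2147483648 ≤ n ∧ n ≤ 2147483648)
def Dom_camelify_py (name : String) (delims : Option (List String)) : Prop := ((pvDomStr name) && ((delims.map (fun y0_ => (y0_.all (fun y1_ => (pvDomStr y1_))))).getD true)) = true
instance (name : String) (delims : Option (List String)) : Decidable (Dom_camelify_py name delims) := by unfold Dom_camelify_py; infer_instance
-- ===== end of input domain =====

-- B replaces A's headsup-flag state machine with an iterator pass that consumes the
-- character following a delimiter directly (idiomatic; same cost, no flag state).


-- shared line `delims = delims or ['-', '_']` (None or empty list is falsy)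
def pyDelims (delims : Option (List String)) : List String :=
  match delims with
  | none => ["-", "_"]
  | some l => if l = [] then ["-", "_"] else l

-- ===== PORT A =====
-- one loop iteration of A: state = (chars, headsup)
def aStep (ds : List String) (st : List Char × Bool) (c : Char) : List Char × Bool :=
  if st.2 then (st.1 ++ [PySem.Chars.upperChar c], false)
  else if ds.contains (String.ofList [c]) then (st.1, true)
  else (st.1 ++ [c], false)

def camelify_py (name : String) (delims : Option (List String)) : String :=
  let ds := pyDelims delims
  String.ofList (name.toList.foldl (aStep ds) ([], false)).1

-- ===== PORT B =====
-- B's single pass: a delimiter consumes the next character (uppercased) in the same step;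
-- `next(it, '').upper()` at the end of the string contributes nothing.
def bGo (ds : List String) : List Char → List Char
  | [] => []
  | [c] => if ds.contains (String.ofList [c]) then [] else [c]
  | c :: d :: rest =>
      if ds.contains (String.ofList [c]) then PySem.Chars.upperChar d :: bGo ds rest
      else c :: bGo ds (d :: rest)

def camelify_py_alt (name : String) (delims : Option (List String)) : String :=
  let ds := pyDelims delims
  String.ofList (bGo ds name.toList)

-- ===== PRECONDITION & SPEC =====
def Spec_camelify_py (name : String) (delims : Option (List String)) (out : String) : Prop := out = camelify_py_alt name delims
instance (name : String) (delims : Option (List String)) (out : String) : Decidable (Spec_camelify_py name delims out) := by unfold Spec_camelify_py; infer_instance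

-- ===== CLAIM (what is proved, stated in full; the proofs are below) =====
def Claim_equal_camelify_py : Prop := ∀ (name : String) (delims : Option (List String)), Dom_camelify_py name delims → Spec_camelify_py name delims (camelify_py name delims)

-- ===== LEMMAS AND PROOFS =====

-- B's pass when the previous character was a delimiter (A's state headsup = true)
def bGoT (ds : List String) : List Char → List Char
  | [] => []
  | d :: r => PySem.Chars.upperChar d :: bGo ds r

theorem fold_char (ds : List String) : ∀ (cs acc : List Char),
    ((List.foldl (aStep ds) (acc, false) cs).1 = acc ++ bGo ds cs) ∧
    ((List.foldl (aStep ds) (acc, true) cs).1 = acc ++ bGoT ds cs)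
  | [], acc => by simp [bGo, bGoT]
  | c :: rest, acc => by
    constructor
    · by_cases h : String.ofList [c] ∈ ds
      · have := (fold_char ds rest acc).2
        cases rest with
        | nil => simp [aStep, h, bGo]
        | cons d r => simp [aStep, h, bGo, bGoT] at this ⊢; simpa using this
      · have := (fold_char ds rest (acc ++ [c])).1
        cases rest with
        | nil => simp [aStep, h, bGo]
        | cons d r => simp [aStep, h, bGo] at this ⊢; simpa using this
    · have := (fold_char ds rest (acc ++ [PySem.Chars.upperChar c])).1
      simp [aStep, bGoT] at this ⊢
      simpa using this

-- ===== VERDICT (by name: the statement is the Claim_ definition above) =====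
theorem camelify_py_spec : Claim_equal_camelify_py := by
  intro name delims _
  unfold Spec_camelify_py camelify_py camelify_py_alt
  have := (fold_char (pyDelims delims) name.toList []).1
  simp at this
  simp [this]
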